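-- pv_equiv track=rewrite | github.com/LocusLontrime/Python | CodeWars_Rush/_6kyu/Barrel_warehouse_6kyu.py | insert_barrels
-- ===== SOURCE A (Python) =====
-- def insert_barrels(warehouse: list[str], barrels: list[str]) -> list[str]:
--     min_space_possible: int = len(warehouse) + 1
--     min_ind: int = -1
--     ind: int = 0
--     barrels_length: int = len(barrels)
--
--     while ind < len(warehouse):
--         temp_ind: int = ind
--         current_space: int = 0
--         while ind < len(warehouse) and warehouse[ind] == '':
--             ind += 1
--             current_space += 1
--         if current_space >= barrels_length:
--             if current_space < min_space_possible:
--                 min_space_possible = current_space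
--                 min_ind = temp_ind
--         ind += 1
--
--     return warehouse if min_ind < 0 else warehouse[:min_ind] + barrels + warehouse[min_ind + barrels_length:]
-- ===== SOURCE B (Python) =====
-- def insert_barrels(warehouse: list[str], barrels: list[str]) -> list[str]:
--     # Search by target gap length: try L = k, k+1, ..., n and take the first
--     # (leftmost) maximal all-empty window of exactly that length.
--     n = len(warehouse)
--     k = len(barrels)
--     for L in range(k, n + 1):
--         for s in range(n - L + 1):
--             if ((s == 0 or warehouse[s - 1] != '')
--                     and (s + L == n or warehouse[s + L] != '')
--                     and all(slot == '' for slot in warehouse[s:s + L])):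
--                 return warehouse[:s] + barrels + warehouse[s + k:]
--     return warehouse
-- ===== Notes on version B (the rewrite author's own statement) =====
-- stated objective: alternative
-- what changed: Instead of A's single left-to-right scan that tracks the running minimum gap, B searches by target length: for each candidate length L = k, k+1, ... it tests every window of exactly L slots for being a maximal all-empty run and splices at the first hit, so the minimum is found by enumerating lengths, not by scanning runs.
import Mathlib
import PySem

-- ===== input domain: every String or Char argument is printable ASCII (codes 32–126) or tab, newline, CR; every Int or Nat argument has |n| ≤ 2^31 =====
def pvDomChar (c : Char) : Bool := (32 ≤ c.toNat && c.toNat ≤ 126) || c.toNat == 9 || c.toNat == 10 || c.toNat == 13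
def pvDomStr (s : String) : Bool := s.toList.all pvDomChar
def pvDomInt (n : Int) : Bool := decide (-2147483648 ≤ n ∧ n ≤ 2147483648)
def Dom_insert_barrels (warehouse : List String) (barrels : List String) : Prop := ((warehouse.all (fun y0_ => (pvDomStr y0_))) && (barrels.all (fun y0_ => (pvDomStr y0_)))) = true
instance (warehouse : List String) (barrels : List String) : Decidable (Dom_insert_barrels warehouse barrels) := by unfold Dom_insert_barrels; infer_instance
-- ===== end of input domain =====

-- B replaces A's single left-to-right min-tracking scan by a search over target lengths
-- (for L = k, k+1, … test every window of exactly L slots for being a maximal empty run,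
-- splice at the first hit); same return value, different algorithm. Proved equal on all inputs.

-- ===== PORT A =====
-- inner 'while ind < len(warehouse) and warehouse[ind] == '''
def insertBarrelsInner (warehouse : List String) (ind cs : Int) : Int × Int :=
  if h : ind < (warehouse.length : Int) ∧ PySem.List.pyGet? warehouse ind = some "" then
    insertBarrelsInner warehouse (ind + 1) (cs + 1)
  else
    (ind, cs)
termination_by ((warehouse.length : Int) - ind).toNat
decreasing_by
  exact (Int.toNat_lt_toNat (sub_pos.mpr h.1)).mpr
    (sub_lt_sub_left (lt_add_one ind) ((warehouse.length : Int)))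

-- the outer loop's termination needs: the inner loop never moves the index left
theorem insertBarrelsInner_fst_ge' (w : List String) :
    ∀ (n : Nat) (ind cs : Int), ((w.length : Int) - ind).toNat ≤ n →
    ind ≤ (insertBarrelsInner w ind cs).1 := by
  intro n
  induction n with
  | zero =>
      intro ind cs h
      rw [insertBarrelsInner, dif_neg (fun hc =>
        absurd h (Nat.not_le.mpr ((Int.toNat_lt_toNat (sub_pos.mpr hc.1)).mpr
          (sub_pos.mpr hc.1))))]
  | succ n ih =>
      intro ind cs h
      rw [insertBarrelsInner]
      split
      next h' =>
        have hm : (((w.length : Int) - (ind + 1)).toNat < ((w.length : Int) - ind).toNat) :=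
          (Int.toNat_lt_toNat (sub_pos.mpr h'.1)).mpr
            (sub_lt_sub_left (lt_add_one ind) ((w.length : Int)))
        have := ih (ind + 1) (cs + 1) (Nat.le_of_lt_succ (Nat.lt_of_lt_of_le hm h))
        exact le_trans (le_of_lt (lt_add_one ind)) this
      next h' =>
        exact le_refl ind

theorem insertBarrelsInner_fst_ge (w : List String) (ind cs : Int) :
    ind ≤ (insertBarrelsInner w ind cs).1 :=
  insertBarrelsInner_fst_ge' w (((w.length : Int) - ind).toNat) ind cs (le_refl _)

-- outer 'while ind < len(warehouse)' carrying (min_space_possible, min_ind)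
def insertBarrelsOuter (warehouse : List String) (barrelsLength : Int)
    (ind minSpace minInd : Int) : Int × Int :=
  if h : ind < (warehouse.length : Int) then
    let tempInd := ind
    let r := insertBarrelsInner warehouse ind 0
    let ind' := r.1
    let cs := r.2
    let st :=
      if cs ≥ barrelsLength then
        if cs < minSpace then (cs, tempInd) else (minSpace, minInd)
      else (minSpace, minInd)
    insertBarrelsOuter warehouse barrelsLength (ind' + 1) st.1 st.2
  else
    (minSpace, minInd)
termination_by ((warehouse.length : Int) - ind).toNat
decreasing_by
  exact (Int.toNat_lt_toNat (sub_pos.mpr h)).mpr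
    (sub_lt_sub_left (lt_of_le_of_lt (insertBarrelsInner_fst_ge warehouse ind 0)
      (lt_add_one _)) ((warehouse.length : Int)))

def insert_barrels (warehouse : List String) (barrels : List String) : List String :=
  let minSpacePossible : Int := (warehouse.length : Int) + 1
  let minInd : Int := -1
  let barrelsLength : Int := (barrels.length : Int)
  let res := insertBarrelsOuter warehouse barrelsLength 0 minSpacePossible minInd
  if res.2 < 0 then warehouse
  else
    PySem.List.slice warehouse none (some res.2) ++ barrels ++
      PySem.List.slice warehouse (some (res.2 + barrelsLength)) none

-- ===== PORT B =====
-- B's window test: 'warehouse[s-1] != ""' is read as pyGet?; for the s ≥ 1 reached by the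
-- search the index is in range, so pyGet? ≠ some "" is exact
def okB (w : List String) (n L s : Int) : Bool :=
  (decide (s = 0) || decide (PySem.List.pyGet? w (s - 1) ≠ some "")) &&
  (decide (s + L = n) || decide (PySem.List.pyGet? w (s + L) ≠ some "")) &&
  (PySem.List.slice w (some s) (some (s + L))).all (fun slot => slot == "")

-- the two nested 'for … return' loops are the first-hit searches find?/findSome? over the ranges
def insert_barrels_alt (warehouse : List String) (barrels : List String) : List String :=
  let n : Int := (warehouse.length : Int)
  let k : Int := (barrels.length : Int)
  match (PySem.List.pyRange k (n + 1) 1).findSome? (fun L =>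
      ((PySem.List.pyRange 0 (n - L + 1) 1).find? (fun s => okB warehouse n L s)).map
        (fun s => (L, s))) with
  | some (_, s) =>
      PySem.List.slice warehouse none (some s) ++ barrels ++
        PySem.List.slice warehouse (some (s + k)) none
  | none => warehouse

-- ===== PRECONDITION & SPEC =====
def Spec_insert_barrels (warehouse : List String) (barrels : List String) (out : List String) : Prop := out = insert_barrels_alt warehouse barrels
instance (warehouse : List String) (barrels : List String) (out : List String) : Decidable (Spec_insert_barrels warehouse barrels out) := by unfold Spec_insert_barrels; infer_instance

-- ===== CLAIM (what is proved, stated in full; the proofs are below) =====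
def Claim_equal_insert_barrels : Prop := ∀ (warehouse : List String) (barrels : List String), Dom_insert_barrels warehouse barrels → Spec_insert_barrels warehouse barrels (insert_barrels warehouse barrels)

-- ===== LEMMAS AND PROOFS =====

-- number of leading empty slots
def leadE : List String → Nat
  | [] => 0
  | x :: xs => if x = "" then leadE xs + 1 else 0

-- the list of maximal empty runs (start, length) of l, offsets from off;
-- gapsI l i s: a run started at s is still open at position i
mutual
def gapsF : List String → Int → List (Int × Int)
  | [], _ => []
  | x :: xs, off => if x = "" then gapsI xs (off + 1) off else gapsF xs (off + 1)
def gapsI : List String → Int → Int → List (Int × Int)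
  | [], i, s => [(s, i - s)]
  | x :: xs, i, s => if x = "" then gapsI xs (i + 1) s else (s, i - s) :: gapsF xs (i + 1)
end

def stepFit (s g : Int × Int) : Int × Int := if g.2 < s.1 then (g.2, g.1) else s

def step2 (bl : Int) (s g : Int × Int) : Int × Int :=
  if g.2 ≥ bl then if g.2 < s.1 then (g.2, g.1) else s else s

-- (s, L) is a maximal empty run of w: all slots in [s, s+L) empty, bounded by a wall or a non-empty slot
def IsGap (w : List String) (s L : Int) : Prop :=
  0 ≤ s ∧ 1 ≤ L ∧ s + L ≤ (w.length : Int) ∧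
  (∀ i : Int, s ≤ i → i < s + L → PySem.List.pyGet? w i = some "") ∧
  (s = 0 ∨ PySem.List.pyGet? w (s - 1) ≠ some "") ∧
  (s + L = (w.length : Int) ∨ PySem.List.pyGet? w (s + L) ≠ some "")

-- the gap A and B both pick: minimal length ≥ k, leftmost at that length
def IsBestGap (w : List String) (k s L : Int) : Prop :=
  (s, L) ∈ gapsF w 0 ∧ k ≤ L ∧
  (∀ g ∈ gapsF w 0, k ≤ g.2 → L ≤ g.2) ∧
  (∀ g ∈ gapsF w 0, g.2 = L → s ≤ g.1)

theorem gapsI_char (l : List String) : ∀ (i s : Int),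
    gapsI l i s = (s, i - s + (leadE l : Int)) :: gapsF (l.drop (leadE l + 1)) (i + (leadE l : Int) + 1) := by
  induction l with
  | nil => intro i s; simp [gapsI, gapsF, leadE]
  | cons x xs ih =>
      intro i s
      by_cases hx : x = ""
      · simp only [gapsI, leadE, if_pos hx, ih (i + 1) s, List.drop_succ_cons]
        push_cast; ring_nf
      · simp [gapsI, leadE, hx]

theorem leadE_pos_head (x : String) (xs : List String) (hx : x = "") :
    leadE (x :: xs) = leadE xs + 1 := by simp [leadE, hx]

theorem leadE_le_length (l : List String) : leadE l ≤ l.length := by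
  induction l with
  | nil => simp [leadE]
  | cons x xs ih =>
      by_cases hx : x = "" <;> simp [leadE, hx]
      omega

theorem leadE_getElem? (l : List String) : ∀ j : Nat, j < leadE l → l[j]? = some "" := by
  induction l with
  | nil => simp [leadE]
  | cons x xs ih =>
      intro j hj
      by_cases hx : x = ""
      · cases j with
        | zero => simp [hx]
        | succ j' =>
            rw [leadE_pos_head x xs hx] at hj
            simpa using ih j' (by omega)
      · simp [leadE, hx] at hj

theorem leadE_stop (l : List String) : l[leadE l]? ≠ some "" := by
  induction l with
  | nil => simp [leadE]
  | cons x xs ih =>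
      by_cases hx : x = ""
      · rw [leadE_pos_head x xs hx]
        simpa using ih
      · simp only [leadE, if_neg hx]
        simpa using hx

theorem pyGet_of_drop (w l : List String) (off : Int) (j : Nat) (hoff : 0 ≤ off)
    (hd : w.drop off.toNat = l) : PySem.List.pyGet? w (off + (j : Int)) = l[j]? := by
  rw [PySem.List.pyGet?_of_nonneg w (by omega)]
  have : (off + (j : Int)).toNat = off.toNat + j := by omega
  rw [this, ← List.getElem?_drop, hd]

theorem inner_eq (w : List String) : ∀ (l : List String) (ind cs : Int), 0 ≤ ind →
    List.drop ind.toNat w = l →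
    insertBarrelsInner w ind cs = (ind + (leadE l : Int), cs + (leadE l : Int)) := by
  intro l
  induction l with
  | nil =>
      intro ind cs hind hdrop
      have hlen : w.length ≤ ind.toNat := List.drop_eq_nil_iff.mp hdrop
      rw [insertBarrelsInner]
      rw [dif_neg (by simp; omega)]
      simp [leadE]
  | cons x xs ih =>
      intro ind cs hind hdrop
      have hlt : ind.toNat < w.length := by
        by_contra hc
        rw [List.drop_eq_nil_of_le (by omega)] at hdrop
        simp at hdrop
      have hget : PySem.List.pyGet? w ind = some x := by
        rw [PySem.List.pyGet?_of_nonneg w hind, ← List.head?_drop, hdrop, List.head?_cons]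
      by_cases hx : x = ""
      · have hdrop' : List.drop (ind + 1).toNat w = xs := by
          have h1 : (ind + 1).toNat = ind.toNat + 1 := by omega
          rw [h1, ← List.tail_drop, hdrop, List.tail_cons]
        rw [insertBarrelsInner, dif_pos ⟨by omega, by rw [hget, hx]⟩,
          ih (ind + 1) (cs + 1) (by omega) hdrop', leadE_pos_head x xs hx]
        simp only [Prod.mk.injEq]
        push_cast
        omega
      · rw [insertBarrelsInner, dif_neg (by
          intro hcontra
          rw [hget] at hcontra
          exact hx (Option.some.inj hcontra.2))]
        simp [leadE, hx]

theorem outer_eq (w : List String) (bl : Int) (hbl : 1 ≤ bl) :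
    ∀ (n : Nat) (l : List String) (ind ms mi : Int), l.length ≤ n → 0 ≤ ind →
    List.drop ind.toNat w = l →
    insertBarrelsOuter w bl ind ms mi = List.foldl (step2 bl) (ms, mi) (gapsF l ind) := by
  intro n
  induction n with
  | zero =>
      intro l ind ms mi hn hind hdrop
      have hl : l = [] := List.length_eq_zero_iff.mp (Nat.le_zero.mp hn)
      subst hl
      have hlen : w.length ≤ ind.toNat := List.drop_eq_nil_iff.mp hdrop
      rw [insertBarrelsOuter, dif_neg (by omega)]
      simp [gapsF]
  | succ n ih =>
      intro l ind ms mi hn hind hdrop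
      cases l with
      | nil =>
          have hlen : w.length ≤ ind.toNat := List.drop_eq_nil_iff.mp hdrop
          rw [insertBarrelsOuter, dif_neg (by omega)]
          simp [gapsF]
      | cons x xs =>
          have hlt : ind.toNat < w.length := by
            by_contra hc
            rw [List.drop_eq_nil_of_le (by omega)] at hdrop
            simp at hdrop
          rw [insertBarrelsOuter, dif_pos (by omega)]
          simp only
          rw [inner_eq w (x :: xs) ind 0 hind hdrop]
          by_cases hx : x = ""
          · have hk : leadE (x :: xs) = leadE xs + 1 := leadE_pos_head x xs hx
            have h1 : (ind + (leadE (x :: xs) : Int) + 1).toNat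
                = ind.toNat + (leadE xs + 1 + 1) := by rw [hk]; omega
            have hdrop' : List.drop (ind + (leadE (x :: xs) : Int) + 1).toNat w
                = xs.drop (leadE xs + 1) := by
              rw [h1, ← List.drop_drop, hdrop, List.drop_succ_cons]
            have hlen' : (xs.drop (leadE xs + 1)).length ≤ n := by
              rw [List.length_drop]
              simp at hn
              omega
            rw [ih _ _ _ _ hlen' (by omega) hdrop']
            have hgaps : gapsF (x :: xs) ind
                = (ind, (leadE (x :: xs) : Int)) :: gapsF (xs.drop (leadE xs + 1))
                    (ind + (leadE (x :: xs) : Int) + 1) := by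
              rw [show gapsF (x :: xs) ind = gapsI xs (ind + 1) ind by simp [gapsF, hx],
                gapsI_char xs (ind + 1) ind, hk]
              simp only [List.cons.injEq, Prod.mk.injEq]
              refine ⟨⟨trivial, by push_cast; ring⟩, ?_⟩
              have harith : ind + 1 + (leadE xs : Int) + 1 = ind + ((leadE xs + 1 : Nat) : Int) + 1 := by
                push_cast; ring
              rw [harith]
            rw [hgaps, List.foldl_cons]
            congr 1
            simp only [step2, zero_add]
          · have hk : leadE (x :: xs) = 0 := by simp [leadE, hx]
            rw [hk]
            have hdrop' : List.drop (ind + (0 : Nat) + 1).toNat w = xs := by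
              have h1 : (ind + (0 : Nat) + 1).toNat = ind.toNat + 1 := by omega
              rw [h1, ← List.tail_drop, hdrop, List.tail_cons]
            have hlen' : xs.length ≤ n := by simp at hn; omega
            rw [ih xs (ind + (0 : Nat) + 1) _ _ hlen' (by omega) hdrop']
            have hst : ¬ ((0 : Int) + (0 : Nat) ≥ bl) := by push_cast; omega
            rw [if_neg hst]
            have hgaps : gapsF (x :: xs) ind = gapsF xs (ind + (0 : Nat) + 1) := by
              simp [gapsF, hx]
            rw [hgaps]

theorem step2_eq_filter (bl : Int) (gs : List (Int × Int)) (s : Int × Int) :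
    List.foldl (step2 bl) s gs = List.foldl stepFit s (gs.filter (fun g => g.2 ≥ bl)) := by
  rw [List.foldl_filter]
  congr 1
  funext a b
  simp only [step2, stepFit, decide_eq_true_eq, ge_iff_le]

-- gap starts are at or after the offset
theorem gaps_start_ge : ∀ (l : List String),
    (∀ (off : Int) (g : Int × Int), g ∈ gapsF l off → off ≤ g.1)
    ∧ (∀ (i s : Int) (g : Int × Int), s ≤ i → g ∈ gapsI l i s → s ≤ g.1) := by
  intro l
  induction l with
  | nil =>
      constructor
      · intro off g hg; simp [gapsF] at hg
      · intro i s g hsi hg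
        simp [gapsI] at hg
        rw [hg]
  | cons x xs ih =>
      obtain ⟨ihF, ihI⟩ := ih
      constructor
      · intro off g hg
        by_cases hx : x = ""
        · simp only [gapsF, if_pos hx] at hg
          exact ihI (off + 1) off g (by omega) hg
        · simp only [gapsF, if_neg hx] at hg
          have := ihF (off + 1) g hg
          omega
      · intro i s g hsi hg
        by_cases hx : x = ""
        · simp only [gapsI, if_pos hx] at hg
          exact ihI (i + 1) s g (by omega) hg
        · simp only [gapsI, if_neg hx] at hg
          rcases List.mem_cons.mp hg with h | h
          · rw [h]
          · have := ihF (i + 1) g h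
            omega

-- gap starts strictly increase along gapsF
theorem gapsF_pairwise : ∀ (N : Nat) (l : List String) (off : Int), l.length ≤ N →
    (gapsF l off).Pairwise (fun a b => a.1 < b.1) := by
  intro N
  induction N with
  | zero =>
      intro l off hn
      have : l = [] := List.length_eq_zero_iff.mp (Nat.le_zero.mp hn)
      subst this
      simp [gapsF]
  | succ N ih =>
      intro l off hn
      cases l with
      | nil => simp [gapsF]
      | cons x xs =>
          by_cases hx : x = ""
          · rw [show gapsF (x :: xs) off = gapsI xs (off + 1) off by simp [gapsF, hx],
              gapsI_char xs (off + 1) off]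
            refine List.pairwise_cons.mpr ⟨?_, ?_⟩
            · intro g hg
              have := (gaps_start_ge (xs.drop (leadE xs + 1))).1 _ g hg
              simp only
              omega
            · refine ih (xs.drop (leadE xs + 1)) _ ?_
              rw [List.length_drop]
              simp at hn
              omega
          · rw [show gapsF (x :: xs) off = gapsF xs (off + 1) by simp [gapsF, hx]]
            exact ih xs (off + 1) (by simp at hn; omega)

-- membership in gapsF ⟺ maximal empty run, generalized over the suffix being scanned
theorem gapsF_mem_iff' (w : List String) : ∀ (N : Nat) (l : List String) (off s L : Int),
    l.length ≤ N → 0 ≤ off → w.drop off.toNat = l →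
    (off = 0 ∨ PySem.List.pyGet? w (off - 1) ≠ some "") →
    ((s, L) ∈ gapsF l off ↔ (IsGap w s L ∧ off ≤ s)) := by
  intro N
  induction N with
  | zero =>
      intro l off s L hn hoff hdrop _
      have hl : l = [] := List.length_eq_zero_iff.mp (Nat.le_zero.mp hn)
      subst hl
      have hlen : w.length ≤ off.toNat := List.drop_eq_nil_iff.mp hdrop
      constructor
      · intro h; simp [gapsF] at h
      · rintro ⟨⟨hs0, hL1, hsl, _⟩, hos⟩
        exfalso
        omega
  | succ N ih =>
      intro l off s L hn hoff hdrop hbnd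
      cases l with
      | nil =>
          have hlen : w.length ≤ off.toNat := List.drop_eq_nil_iff.mp hdrop
          constructor
          · intro h; simp [gapsF] at h
          · rintro ⟨⟨hs0, hL1, hsl, _⟩, hos⟩
            exfalso
            omega
      | cons x xs =>
          have hlt : off.toNat < w.length := by
            by_contra hc
            rw [List.drop_eq_nil_of_le (by omega)] at hdrop
            simp at hdrop
          have hget : PySem.List.pyGet? w off = some x := by
            rw [PySem.List.pyGet?_of_nonneg w hoff, ← List.head?_drop, hdrop, List.head?_cons]
          have hd1 : w.drop (off + 1).toNat = xs := by
            have h1 : (off + 1).toNat = off.toNat + 1 := by omega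
            rw [h1, ← List.tail_drop, hdrop, List.tail_cons]
          have hxlen : xs.length ≤ N := by simp at hn; omega
          by_cases hx : x = ""
          · -- a run starts at off
            have hexp : gapsF (x :: xs) off
                = (off, 1 + (leadE xs : Int)) :: gapsF (xs.drop (leadE xs + 1))
                    (off + (1 + (leadE xs : Int)) + 1) := by
              rw [show gapsF (x :: xs) off = gapsI xs (off + 1) off by simp [gapsF, hx],
                gapsI_char xs (off + 1) off]
              simp only [List.cons.injEq, Prod.mk.injEq]
              refine ⟨⟨trivial, by ring⟩, ?_⟩
              congr 1
              ring
            have hlead := leadE_le_length xs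
            have hxslen : xs.length = w.length - off.toNat - 1 := by
              have := congrArg List.length hdrop
              simp only [List.length_drop, List.length_cons] at this
              omega
            have hinterior : ∀ i : Int, off ≤ i → i < off + (1 + (leadE xs : Int)) →
                PySem.List.pyGet? w i = some "" := by
              intro i hi1 hi2
              rcases eq_or_lt_of_le hi1 with heq | hgt
              · rw [← heq, hget, hx]
              · have hj : i = (off + 1) + ((i - off - 1).toNat : Int) := by omega
                rw [hj, pyGet_of_drop w xs (off + 1) _ (by omega) hd1]
                exact leadE_getElem? xs _ (by omega)
            have hstop : PySem.List.pyGet? w (off + (1 + (leadE xs : Int))) ≠ some "" := by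
              have hj : off + (1 + (leadE xs : Int)) = (off + 1) + ((leadE xs : Nat) : Int) := by
                omega
              rw [hj, pyGet_of_drop w xs (off + 1) _ (by omega) hd1]
              exact leadE_stop xs
            have hbound : off + (1 + (leadE xs : Int)) ≤ (w.length : Int) := by omega
            have hheadgap : IsGap w off (1 + (leadE xs : Int)) :=
              ⟨hoff, by omega, hbound, hinterior, hbnd, Or.inr hstop⟩
            have hdrop2 : w.drop (off + (1 + (leadE xs : Int)) + 1).toNat
                = xs.drop (leadE xs + 1) := by
              have h1 : (off + (1 + (leadE xs : Int)) + 1).toNat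
                  = off.toNat + (leadE xs + 1 + 1) := by omega
              rw [h1, ← List.drop_drop, hdrop, List.drop_succ_cons]
            have hih := ih (xs.drop (leadE xs + 1)) (off + (1 + (leadE xs : Int)) + 1) s L
              (by rw [List.length_drop]; omega) (by omega) hdrop2
              (Or.inr (by
                rw [show off + (1 + (leadE xs : Int)) + 1 - 1 = off + (1 + (leadE xs : Int)) by ring]
                exact hstop))
            rw [hexp, List.mem_cons, hih]
            constructor
            · rintro (hhead | ⟨hg, h2⟩)
              · obtain ⟨h1, h2⟩ := Prod.mk.injEq .. ▸ hhead
                rw [h1, h2]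
                exact ⟨hheadgap, le_refl off⟩
              · exact ⟨hg, by omega⟩
            · rintro ⟨hg, hos⟩
              by_cases hseq : s = off
              · left
                have hL1 : 1 ≤ L := hg.2.1
                have hLc : L = 1 + (leadE xs : Int) := by
                  rcases lt_trichotomy L (1 + (leadE xs : Int)) with hc | hc | hc
                  · exfalso
                    have hin := hinterior (s + L) (by omega) (by omega)
                    rcases hg.2.2.2.2.2 with hr | hr
                    · omega
                    · exact hr hin
                  · exact hc
                  · exfalso
                    have hin := hg.2.2.2.1 (off + (1 + (leadE xs : Int))) (by omega) (by omega)
                    exact hstop hin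
                rw [hseq, hLc]
              · right
                refine ⟨hg, ?_⟩
                by_contra hc
                have hsrange : off < s ∧ s ≤ off + (1 + (leadE xs : Int)) := by
                  constructor
                  · rcases lt_or_eq_of_le hos with h | h
                    · exact h
                    · exact absurd h.symm hseq
                  · omega
                have hin := hinterior (s - 1) (by omega) (by omega)
                rcases hg.2.2.2.2.1 with hl0 | hl1
                · omega
                · exact hl1 hin
          · rw [show gapsF (x :: xs) off = gapsF xs (off + 1) by simp [gapsF, hx]]
            rw [ih xs (off + 1) s L hxlen (by omega) hd1
              (Or.inr (by
                rw [show off + 1 - 1 = off by ring, hget]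
                intro hc
                exact hx (Option.some.inj hc)))]
            constructor
            · rintro ⟨hg, hos⟩
              exact ⟨hg, by omega⟩
            · rintro ⟨hg, hos⟩
              refine ⟨hg, ?_⟩
              rcases lt_or_eq_of_le hos with h | h
              · omega
              · exfalso
                have hin := hg.2.2.2.1 s (le_refl s) (by have := hg.2.1; omega)
                rw [← h, hget] at hin
                exact hx (Option.some.inj hin)

theorem gapsF_mem_iff (w : List String) (s L : Int) :
    (s, L) ∈ gapsF w 0 ↔ IsGap w s L := by
  rw [gapsF_mem_iff' w w.length w 0 s L (le_refl _) (le_refl _) (by simp) (Or.inl rfl)]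
  constructor
  · exact fun h => h.1
  · exact fun h => ⟨h, h.1⟩

-- B's window test ⟺ IsGap, for a window inside the warehouse
theorem okB_iff (w : List String) (L s : Int) (hL : 1 ≤ L) (hs : 0 ≤ s)
    (hsl : s + L ≤ (w.length : Int)) :
    okB w (w.length : Int) L s = true ↔ IsGap w s L := by
  have hall : ((PySem.List.slice w (some s) (some (s + L))).all (fun slot => slot == "") = true)
      ↔ (∀ i : Int, s ≤ i → i < s + L → PySem.List.pyGet? w i = some "") := by
    rw [PySem.List.slice_toNat w hs (by omega), List.all_eq_true]
    constructor
    · intro hA i hi1 hi2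
      have hlen : ((w.drop s.toNat).take ((s + L).toNat - s.toNat)).length = L.toNat := by
        simp only [List.length_take, List.length_drop]
        omega
      have hb : (i - s).toNat < ((w.drop s.toNat).take ((s + L).toNat - s.toNat)).length := by
        rw [hlen]; omega
      have he : ((w.drop s.toNat).take ((s + L).toNat - s.toNat))[(i - s).toNat] = w[i.toNat]'(by
          have := hb; simp only [List.length_take, List.length_drop] at this; omega) := by
        rw [List.getElem_take, List.getElem_drop]
        congr 1
        omega
      have := hA _ (List.getElem_mem hb)
      rw [he] at this
      rw [PySem.List.pyGet?_of_nonneg w (by omega), List.getElem?_eq_getElem (by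
        have := hb; simp only [List.length_take, List.length_drop] at this; omega)]
      exact congrArg some (by exact beq_iff_eq.mp this)
    · intro hI x hx
      obtain ⟨j, hj, rfl⟩ := List.mem_iff_getElem.mp hx
      have hjL : j < L.toNat := by
        simp only [List.length_take, List.length_drop] at hj
        omega
      have hwb : s.toNat + j < w.length := by omega
      have he : ((w.drop s.toNat).take ((s + L).toNat - s.toNat))[j]'hj = w[s.toNat + j]'hwb := by
        rw [List.getElem_take, List.getElem_drop]
      have := hI (s + (j : Int)) (by omega) (by omega)
      rw [PySem.List.pyGet?_of_nonneg w (by omega), List.getElem?_eq_getElem (by omega)] at this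
      have hval : w[(s + (j : Int)).toNat]'(by omega) = "" := Option.some.inj this
      rw [he]
      have : w[s.toNat + j]'hwb = "" := by
        have harg : (s + (j : Int)).toNat = s.toNat + j := by omega
        rw [← hval]
        congr 1
        omega
      rw [this]
      rfl
  unfold okB IsGap
  rw [Bool.and_eq_true, Bool.and_eq_true, hall]
  simp only [Bool.or_eq_true, decide_eq_true_eq]
  constructor
  · rintro ⟨⟨h1, h2⟩, h3⟩
    exact ⟨hs, hL, hsl, h3, h1, h2⟩
  · rintro ⟨_, _, _, h3, h1, h2⟩
    exact ⟨⟨h1, h2⟩, h3⟩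

-- first-hit searches over ranges return the least hit
theorem find?_pyRange_some : ∀ (N : Nat) (a b x : Int) (p : Int → Bool), (b - a).toNat ≤ N →
    List.find? p (PySem.List.pyRange a b 1) = some x →
    a ≤ x ∧ x < b ∧ p x = true ∧ ∀ y, a ≤ y → y < x → p y = false := by
  intro N
  induction N with
  | zero =>
      intro a b x p hN hf
      rw [PySem.List.pyRange_one_eq_nil (by omega)] at hf
      simp at hf
  | succ N ih =>
      intro a b x p hN hf
      by_cases hab : a < b
      · rw [PySem.List.pyRange_one_cons hab, List.find?_cons] at hf
        by_cases hpa : p a = true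
        · rw [hpa] at hf
          obtain rfl := Option.some.inj hf
          exact ⟨le_refl _, hab, hpa, fun y h1 h2 => absurd h2 (by omega)⟩
        · rw [Bool.not_eq_true] at hpa
          rw [hpa] at hf
          obtain ⟨h1, h2, h3, h4⟩ := ih (a + 1) b x p (by omega) hf
          refine ⟨by omega, h2, h3, fun y hy1 hy2 => ?_⟩
          by_cases hya : y = a
          · subst hya; exact hpa
          · exact h4 y (by omega) hy2
      · rw [PySem.List.pyRange_one_eq_nil (by omega)] at hf
        simp at hf

theorem findSome?_pyRange_some {β : Type} : ∀ (N : Nat) (a b : Int) (f : Int → Option β) (r : β),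
    (b - a).toNat ≤ N → List.findSome? f (PySem.List.pyRange a b 1) = some r →
    ∃ x, a ≤ x ∧ x < b ∧ f x = some r ∧ ∀ y, a ≤ y → y < x → f y = none := by
  intro N
  induction N with
  | zero =>
      intro a b f r hN hf
      rw [PySem.List.pyRange_one_eq_nil (by omega)] at hf
      simp at hf
  | succ N ih =>
      intro a b f r hN hf
      by_cases hab : a < b
      · rw [PySem.List.pyRange_one_cons hab, List.findSome?_cons] at hf
        cases hfa : f a with
        | some v =>
            rw [hfa] at hf
            simp only at hf
            exact ⟨a, le_refl a, hab, by rw [hfa, hf], fun y h1 h2 => absurd h2 (by omega)⟩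
        | none =>
            rw [hfa] at hf
            simp only at hf
            obtain ⟨x, h1, h2, h3, h4⟩ := ih (a + 1) b f r (by omega) hf
            refine ⟨x, by omega, h2, h3, fun y hy1 hy2 => ?_⟩
            by_cases hya : y = a
            · subst hya; exact hfa
            · exact h4 y (by omega) hy2
      · rw [PySem.List.pyRange_one_eq_nil (by omega)] at hf
        simp at hf

-- A's fold keeps the (length, start)-lexicographically least pair when starts increase
theorem fold_min : ∀ (t : List (Int × Int)) (g : Int × Int),
    (g :: t).Pairwise (fun a b => a.1 < b.1) →
    ((List.foldl stepFit (g.2, g.1) t).2, (List.foldl stepFit (g.2, g.1) t).1) ∈ g :: t ∧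
    (∀ x ∈ g :: t, (List.foldl stepFit (g.2, g.1) t).1 ≤ x.2) ∧
    (∀ x ∈ g :: t, x.2 = (List.foldl stepFit (g.2, g.1) t).1 →
      (List.foldl stepFit (g.2, g.1) t).2 ≤ x.1) := by
  intro t
  induction t with
  | nil =>
      intro g _
      refine ⟨by simp, ?_, ?_⟩
      · intro x hx; rw [List.mem_singleton.mp hx]; simp
      · intro x hx _; rw [List.mem_singleton.mp hx]; simp
  | cons h t ih =>
      intro g hpw
      rw [List.pairwise_cons] at hpw
      obtain ⟨hg, hpw'⟩ := hpw
      rw [List.pairwise_cons] at hpw'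
      obtain ⟨hh, hpt⟩ := hpw'
      have hgh : g.1 < h.1 := hg h List.mem_cons_self
      set g' : Int × Int := if h.2 < g.2 then h else g with hg'
      have hstep : stepFit (g.2, g.1) h = (g'.2, g'.1) := by
        simp only [stepFit, hg']
        by_cases hc : h.2 < g.2 <;> simp [hc]
      have hpw2 : (g' :: t).Pairwise (fun a b => a.1 < b.1) := by
        rw [List.pairwise_cons]
        refine ⟨?_, hpt⟩
        intro x hx
        by_cases hc : h.2 < g.2
        · simp only [hg', if_pos hc]; exact hh x hx
        · simp only [hg', if_neg hc]; exact hg x (List.mem_cons_of_mem h hx)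
      obtain ⟨ihm, ihle, ihfirst⟩ := ih g' hpw2
      rw [List.foldl_cons, hstep]
      set r := List.foldl stepFit (g'.2, g'.1) t with hr
      refine ⟨?_, ?_, ?_⟩
      · rcases List.mem_cons.mp ihm with hc | hc
        · by_cases hcc : h.2 < g.2
          · simp only [hg', if_pos hcc] at hc
            exact List.mem_cons_of_mem g (hc ▸ List.mem_cons_self)
          · simp only [hg', if_neg hcc] at hc
            exact hc ▸ List.mem_cons_self
        · exact List.mem_cons_of_mem g (List.mem_cons_of_mem h hc)
      · intro x hx
        rcases List.mem_cons.mp hx with hc | hc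
        · subst hc
          by_cases hcc : h.2 < x.2
          · have := ihle g' List.mem_cons_self
            simp only [hg', if_pos hcc] at this
            omega
          · have := ihle g' List.mem_cons_self
            simp only [hg', if_neg hcc] at this
            exact this
        · rcases List.mem_cons.mp hc with hc2 | hc2
          · subst hc2
            by_cases hcc : x.2 < g.2
            · have := ihle g' List.mem_cons_self
              simp only [hg', if_pos hcc] at this
              exact this
            · have := ihle g' List.mem_cons_self
              simp only [hg', if_neg hcc] at this
              omega
          · exact ihle x (List.mem_cons_of_mem g' hc2)
      · intro x hx hx2
        rcases List.mem_cons.mp hx with hc | hc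
        · subst hc
          by_cases hcc : h.2 < x.2
          · have := ihle g' List.mem_cons_self
            simp only [hg', if_pos hcc] at this
            omega
          · have := ihfirst g' List.mem_cons_self (by simp only [hg', if_neg hcc]; exact hx2)
            simp only [hg', if_neg hcc] at this
            exact this
        · rcases List.mem_cons.mp hc with hc2 | hc2
          · subst hc2
            by_cases hcc : x.2 < g.2
            · have := ihfirst g' List.mem_cons_self (by simp only [hg', if_pos hcc]; exact hx2)
              simp only [hg', if_pos hcc] at this
              exact this
            · have hle := ihle g' List.mem_cons_self
              simp only [hg', if_neg hcc] at hle
              have hgm : g.2 = r.1 := by omega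
              have := ihfirst g' List.mem_cons_self (by simp only [hg', if_neg hcc]; exact hgm)
              simp only [hg', if_neg hcc] at this
              omega
          · exact ihfirst x (List.mem_cons_of_mem g' hc2) hx2

theorem bestGap_unique (w : List String) (k s L s' L' : Int)
    (h : IsBestGap w k s L) (h' : IsBestGap w k s' L') : s = s' ∧ L = L' := by
  obtain ⟨hm, hk, hmin, hsmin⟩ := h
  obtain ⟨hm', hk', hmin', hsmin'⟩ := h'
  have hLL : L = L' := le_antisymm (hmin (s', L') hm' hk') (hmin' (s, L) hm hk)
  exact ⟨le_antisymm (hsmin (s', L') hm' hLL.symm) (hsmin' (s, L) hm hLL), hLL⟩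

theorem insert_barrels_spec : Claim_equal_insert_barrels := by
  intro w b _dom
  unfold Spec_insert_barrels
  by_cases hb : b = []
  · -- empty barrels: both sides return the warehouse (splicing nothing is the identity)
    subst hb
    simp only [insert_barrels, insert_barrels_alt, List.length_nil, Nat.cast_zero, add_zero]
    have hsplice : ∀ (m : Int), 0 ≤ m →
        PySem.List.slice w none (some m) ++ ([] : List String) ++
          PySem.List.slice w (some m) none = w := by
      intro m hm
      rw [PySem.List.slice_to w hm, PySem.List.slice_from w hm, List.append_nil,
        List.take_append_drop]
    cases hX : (PySem.List.pyRange 0 ((w.length : Int) + 1) 1).findSome? (fun L =>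
        ((PySem.List.pyRange 0 ((w.length : Int) - L + 1) 1).find?
          (fun s => okB w (w.length : Int) L s)).map (fun s => (L, s))) with
    | none =>
        by_cases hres : (insertBarrelsOuter w 0 0 ((w.length : Int) + 1) (-1)).2 < 0
        · rw [if_pos hres]
        · rw [if_neg hres]
          exact hsplice _ (by omega)
    | some r =>
        obtain ⟨L, s⟩ := r
        obtain ⟨L₀, _, _, hfeq, _⟩ := findSome?_pyRange_some
          (((w.length : Int) + 1 - 0).toNat) 0 ((w.length : Int) + 1) _ (L, s)
          (le_refl _) hX
        obtain ⟨s₀, hfind, hpair⟩ := Option.map_eq_some_iff.mp hfeq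
        obtain ⟨hL0, hs0⟩ := Prod.mk.injEq .. ▸ hpair
        obtain ⟨hsge, _, _, _⟩ := find?_pyRange_some
          (((w.length : Int) - L₀ + 1 - 0).toNat) 0 ((w.length : Int) - L₀ + 1) s₀ _
          (le_refl _) hfind
        dsimp only
        rw [hsplice s (by omega)]
        by_cases hres : (insertBarrelsOuter w 0 0 ((w.length : Int) + 1) (-1)).2 < 0
        · rw [if_pos hres]
        · rw [if_neg hres]
          exact hsplice _ (by omega)
  · -- non-empty barrels
    have hk1 : (1 : Int) ≤ (b.length : Int) := by
      have : b.length ≠ 0 := fun h => hb (List.length_eq_zero_iff.mp h)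
      omega
    simp only [insert_barrels, insert_barrels_alt]
    have hfold : insertBarrelsOuter w (b.length : Int) 0 ((w.length : Int) + 1) (-1)
        = List.foldl stepFit (((w.length : Int) + 1 : Int), (-1 : Int))
            ((gapsF w 0).filter (fun g => g.2 ≥ (b.length : Int))) := by
      rw [outer_eq w (b.length : Int) hk1 w.length w 0 _ _ (le_refl _) (by omega) (by simp),
        step2_eq_filter]
    cases hX : (PySem.List.pyRange (b.length : Int) ((w.length : Int) + 1) 1).findSome? (fun L =>
        ((PySem.List.pyRange 0 ((w.length : Int) - L + 1) 1).find?
          (fun s => okB w (w.length : Int) L s)).map (fun s => (L, s))) with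
    | none =>
        have hnone := List.findSome?_eq_none_iff.mp hX
        have hF : (gapsF w 0).filter (fun g => g.2 ≥ (b.length : Int)) = [] := by
          rw [List.filter_eq_nil_iff]
          rintro ⟨s', L'⟩ hg hk2
          simp only [decide_eq_true_eq, ge_iff_le] at hk2
          have hgap := (gapsF_mem_iff w s' L').mp hg
          have hs'0 := hgap.1
          have hL'1 := hgap.2.1
          have hbound := hgap.2.2.1
          have hok : okB w (w.length : Int) L' s' = true :=
            (okB_iff w L' s' hL'1 hs'0 hbound).mpr hgap
          have hmem : L' ∈ PySem.List.pyRange (b.length : Int) ((w.length : Int) + 1) 1 :=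
            PySem.List.mem_pyRange_one.mpr ⟨hk2, by omega⟩
          have := hnone L' hmem
          rw [Option.map_eq_none_iff, List.find?_eq_none] at this
          exact this s' (PySem.List.mem_pyRange_one.mpr ⟨hs'0, by omega⟩) hok
        rw [hfold, hF, List.foldl_nil, if_pos (by norm_num)]
    | some r =>
        obtain ⟨L, s⟩ := r
        dsimp only
        obtain ⟨L₀, hL₀1, hL₀2, hfeq, hprev⟩ := findSome?_pyRange_some
          (((w.length : Int) + 1 - (b.length : Int)).toNat) (b.length : Int)
          ((w.length : Int) + 1) _ (L, s) (le_refl _) hX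
        obtain ⟨s₀, hfind, hpair⟩ := Option.map_eq_some_iff.mp hfeq
        obtain ⟨hL0, hs0⟩ := Prod.mk.injEq .. ▸ hpair
        subst hL0
        subst hs0
        obtain ⟨hsge, hslt, hokB, hsprev⟩ := find?_pyRange_some
          (((w.length : Int) - L₀ + 1 - 0).toNat) 0 ((w.length : Int) - L₀ + 1) s₀ _
          (le_refl _) hfind
        have hgap : IsGap w s₀ L₀ :=
          (okB_iff w L₀ s₀ (by omega) hsge (by omega)).mp hokB
        have hmemG : (s₀, L₀) ∈ gapsF w 0 := (gapsF_mem_iff w s₀ L₀).mpr hgap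
        have hbestB : IsBestGap w (b.length : Int) s₀ L₀ := by
          refine ⟨hmemG, hL₀1, ?_, ?_⟩
          · rintro ⟨s', L'⟩ hg hk2
            simp only at hk2 ⊢
            by_contra hc
            have hgap' := (gapsF_mem_iff w s' L').mp hg
            have hs'0 := hgap'.1
            have hL'1 := hgap'.2.1
            have hbound' := hgap'.2.2.1
            have hok' : okB w (w.length : Int) L' s' = true :=
              (okB_iff w L' s' hL'1 hs'0 hbound').mpr hgap'
            have := hprev L' hk2 (by omega)
            rw [Option.map_eq_none_iff, List.find?_eq_none] at this
            exact this s' (PySem.List.mem_pyRange_one.mpr ⟨hs'0, by omega⟩) hok'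
          · rintro ⟨s', L'⟩ hg hL'
            simp only at hL' ⊢
            subst hL'
            by_contra hc
            have hgap' := (gapsF_mem_iff w s' L').mp hg
            have hs'0 := hgap'.1
            have hL'1 := hgap'.2.1
            have hbound' := hgap'.2.2.1
            have hok' : okB w (w.length : Int) L' s' = true :=
              (okB_iff w L' s' hL'1 hs'0 hbound').mpr hgap'
            have := hsprev s' hs'0 (by omega)
            rw [hok'] at this
            exact Bool.true_eq_false ▸ this
        -- A also lands on this gap
        have hmemF : (s₀, L₀) ∈ (gapsF w 0).filter (fun g => g.2 ≥ (b.length : Int)) :=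
          List.mem_filter.mpr ⟨hmemG, by simp only [decide_eq_true_eq, ge_iff_le]; exact hL₀1⟩
        cases hFeq : (gapsF w 0).filter (fun g => g.2 ≥ (b.length : Int)) with
        | nil => rw [hFeq] at hmemF; simp at hmemF
        | cons g t =>
            have hpwF : (g :: t).Pairwise (fun a b => a.1 < b.1) := by
              rw [← hFeq]
              exact (gapsF_pairwise w.length w 0 (le_refl _)).filter _
            have hgG : g ∈ gapsF w 0 := (List.mem_filter.mp (hFeq ▸ List.mem_cons_self)).1
            have hgk : (b.length : Int) ≤ g.2 := by
              have := (List.mem_filter.mp (hFeq ▸ List.mem_cons_self)).2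
              simpa using this
            have hgGap := (gapsF_mem_iff w g.1 g.2).mp hgG
            have hglen : g.2 ≤ (w.length : Int) := by
              have h1 := hgGap.1
              have h3 := hgGap.2.2.1
              omega
            have hstep1 : stepFit (((w.length : Int) + 1 : Int), (-1 : Int)) g = (g.2, g.1) := by
              simp only [stepFit]
              rw [if_pos (by show g.2 < (w.length : Int) + 1; omega)]
            obtain ⟨hrmem, hrle, hrfirst⟩ := fold_min t g hpwF
            have hbestA : IsBestGap w (b.length : Int)
                (List.foldl stepFit (g.2, g.1) t).2 (List.foldl stepFit (g.2, g.1) t).1 := by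
              refine ⟨by rw [← hFeq] at hrmem; exact (List.mem_filter.mp hrmem).1, ?_, ?_, ?_⟩
              · have := (List.mem_filter.mp (by rw [← hFeq] at hrmem; exact hrmem)).2
                simpa using this
              · intro g' hg' hk2
                have : g' ∈ g :: t := by
                  rw [← hFeq]
                  exact List.mem_filter.mpr ⟨hg', by simpa using hk2⟩
                exact hrle g' this
              · intro g' hg' hL'
                have hk2 : (b.length : Int) ≤ g'.2 := by
                  rw [hL']
                  have := (List.mem_filter.mp (by rw [← hFeq] at hrmem; exact hrmem)).2
                  simpa using this
                have : g' ∈ g :: t := by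
                  rw [← hFeq]
                  exact List.mem_filter.mpr ⟨hg', by simpa using hk2⟩
                exact hrfirst g' this hL'
            obtain ⟨hseq, hLeq⟩ := bestGap_unique w (b.length : Int) _ _ _ _ hbestA hbestB
            rw [hfold, hFeq, List.foldl_cons, hstep1]
            rw [if_neg (by omega)]
            rw [hseq]
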